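-- pv_equiv track=rewrite | github.com/openlabstudio/dataroom-intelligence | agents/market_detection.py | _determine_industry_from_vertical
-- ===== SOURCE A (Python) =====
-- def _determine_industry_from_vertical(vertical: str) -> str:
--     """Determine broad industry category from vertical"""
--     vertical_lower = vertical.lower()
--
--     if any(term in vertical_lower for term in ['fintech', 'payment', 'banking', 'insurance']):
--         return 'financial technology'
--     elif any(term in vertical_lower for term in ['health', 'medical', 'pharma', 'bio']):
--         return 'healthcare technology'
--     elif any(term in vertical_lower for term in ['clean', 'sustain', 'environment', 'green']):
--         return 'environmental technology'
--     elif any(term in vertical_lower for term in ['edu', 'learn', 'training']):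
--         return 'education technology'
--     elif any(term in vertical_lower for term in ['retail', 'commerce', 'consumer']):
--         return 'consumer technology'
--     elif any(term in vertical_lower for term in ['enterprise', 'b2b', 'saas']):
--         return 'enterprise technology'
--     else:
--         return 'technology'  # Default broad category
-- ===== SOURCE B (Python) =====
-- # Sliding-window keyword scan: walk the lowered string position by position,
-- # match every keyword against each position, and keep the best (lowest) category
-- # priority seen; no if/elif chain and no early return.
-- _TERM_PRIORITY = {
--     'fintech': 0, 'payment': 0, 'banking': 0, 'insurance': 0,
--     'health': 1, 'medical': 1, 'pharma': 1, 'bio': 1,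
--     'clean': 2, 'sustain': 2, 'environment': 2, 'green': 2,
--     'edu': 3, 'learn': 3, 'training': 3,
--     'retail': 4, 'commerce': 4, 'consumer': 4,
--     'enterprise': 5, 'b2b': 5, 'saas': 5,
-- }
-- _CATEGORIES = ('financial technology', 'healthcare technology',
--                'environmental technology', 'education technology',
--                'consumer technology', 'enterprise technology')
--
-- def _determine_industry_from_vertical(vertical: str) -> str:
--     vertical_lower = vertical.lower()
--     best = len(_CATEGORIES)
--     for i in range(len(vertical_lower)):
--         for term, priority in _TERM_PRIORITY.items():
--             if priority < best and vertical_lower.startswith(term, i):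
--                 best = priority
--     return _CATEGORIES[best] if best < len(_CATEGORIES) else 'technology'
-- ===== Notes on version B (the rewrite author's own statement) =====
-- stated objective: alternative
-- what changed: Replaces the six-branch if/elif chain of per-term substring searches with a position-major sliding-window scan that matches all keywords at each index and keeps the minimum category priority, selecting the category at the end.
import Mathlib
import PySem

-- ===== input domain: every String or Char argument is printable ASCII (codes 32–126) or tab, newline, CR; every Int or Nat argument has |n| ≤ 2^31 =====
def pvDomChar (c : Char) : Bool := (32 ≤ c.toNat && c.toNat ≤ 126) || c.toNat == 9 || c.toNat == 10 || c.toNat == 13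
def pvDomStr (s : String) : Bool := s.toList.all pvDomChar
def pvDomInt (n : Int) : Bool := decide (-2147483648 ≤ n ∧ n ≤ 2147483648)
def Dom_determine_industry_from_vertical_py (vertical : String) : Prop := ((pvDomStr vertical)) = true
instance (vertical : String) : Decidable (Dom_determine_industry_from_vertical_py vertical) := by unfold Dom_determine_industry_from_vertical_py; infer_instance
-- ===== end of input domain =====

-- B replaces A's six-branch if/elif chain with a position-major sliding-window keyword scan
-- keeping the minimum category priority; objective: alternative (same behaviour, different algorithm).


-- ===== PORT A =====
-- any(term in vertical_lower for term in [...]) -> List.any with PySem.Str.isIn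
def determine_industry_from_vertical_py (vertical : String) : String :=
  let vertical_lower := PySem.Str.lower vertical
  if ["fintech", "payment", "banking", "insurance"].any (fun term => PySem.Str.isIn term vertical_lower) then
    "financial technology"
  else if ["health", "medical", "pharma", "bio"].any (fun term => PySem.Str.isIn term vertical_lower) then
    "healthcare technology"
  else if ["clean", "sustain", "environment", "green"].any (fun term => PySem.Str.isIn term vertical_lower) then
    "environmental technology"
  else if ["edu", "learn", "training"].any (fun term => PySem.Str.isIn term vertical_lower) then
    "education technology"
  else if ["retail", "commerce", "consumer"].any (fun term => PySem.Str.isIn term vertical_lower) then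
    "consumer technology"
  else if ["enterprise", "b2b", "saas"].any (fun term => PySem.Str.isIn term vertical_lower) then
    "enterprise technology"
  else
    "technology"

-- ===== PORT B =====
-- _TERM_PRIORITY dict -> association list in insertion order (term as code points, priority)
def pvTermPriority : List (List Char × Nat) :=
  [("fintech".toList, 0), ("payment".toList, 0), ("banking".toList, 0), ("insurance".toList, 0),
   ("health".toList, 1), ("medical".toList, 1), ("pharma".toList, 1), ("bio".toList, 1),
   ("clean".toList, 2), ("sustain".toList, 2), ("environment".toList, 2), ("green".toList, 2),
   ("edu".toList, 3), ("learn".toList, 3), ("training".toList, 3),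
   ("retail".toList, 4), ("commerce".toList, 4), ("consumer".toList, 4),
   ("enterprise".toList, 5), ("b2b".toList, 5), ("saas".toList, 5)]

def pvCategories : List String :=
  ["financial technology", "healthcare technology", "environmental technology",
   "education technology", "consumer technology", "enterprise technology"]

-- vertical_lower.startswith(term, i) with 0 ≤ i < len is exactly term.isPrefixOf (drop i)
def determine_industry_from_vertical_py_alt (vertical : String) : String :=
  let vl := (PySem.Str.lower vertical).toList
  let best := (List.range vl.length).foldl
    (fun best i => pvTermPriority.foldl
      (fun best tp =>
        if decide (tp.2 < best) && tp.1.isPrefixOf (vl.drop i) then tp.2 else best)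
      best)
    pvCategories.length
  if best < pvCategories.length then pvCategories.getD best "technology" else "technology"

-- ===== PRECONDITION & SPEC =====
def Spec_determine_industry_from_vertical_py (vertical : String) (out : String) : Prop := out = determine_industry_from_vertical_py_alt vertical
instance (vertical : String) (out : String) : Decidable (Spec_determine_industry_from_vertical_py vertical out) := by unfold Spec_determine_industry_from_vertical_py; infer_instance

-- ===== CLAIM (what is proved, stated in full; the proofs are below) =====
def Claim_equal_determine_industry_from_vertical_py : Prop := ∀ (vertical : String), Dom_determine_industry_from_vertical_py vertical → Spec_determine_industry_from_vertical_py vertical (determine_industry_from_vertical_py vertical)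

-- ===== LEMMAS AND PROOFS =====

-- the (position, entry) pairs B's nested loops visit
def pvPairs (vl : List Char) : List (Nat × (List Char × Nat)) :=
  (List.range vl.length).flatMap (fun i => pvTermPriority.map (fun tp => (i, tp)))

-- flatten the nested foldl into one foldl over pvPairs
lemma pvFlatten (vl : List Char) (b : Nat) :
    (List.range vl.length).foldl
      (fun best i => pvTermPriority.foldl
        (fun best tp => if decide (tp.2 < best) && tp.1.isPrefixOf (vl.drop i) then tp.2 else best) best) b
    = (pvPairs vl).foldl
        (fun best x => if decide (x.2.2 < best) && x.2.1.isPrefixOf (vl.drop x.1) then x.2.2 else best) b := by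
  unfold pvPairs
  induction (List.range vl.length) generalizing b with
  | nil => rfl
  | cons i rest ih =>
    simp only [List.foldl_cons, List.flatMap_cons, List.foldl_append, List.foldl_map, ih]

-- characterization of the min-keeping fold
lemma pvFoldMin {α : Type} (v : α → Nat) (c : α → Bool) (l : List α) (b : Nat) :
    (l.foldl (fun best a => if decide (v a < best) && c a then v a else best) b) ≤ b
    ∧ ((l.foldl (fun best a => if decide (v a < best) && c a then v a else best) b) = b
       ∨ ∃ a ∈ l, c a = true ∧ v a = l.foldl (fun best a => if decide (v a < best) && c a then v a else best) b)
    ∧ ∀ a ∈ l, c a = true → (l.foldl (fun best a => if decide (v a < best) && c a then v a else best) b) ≤ v a := by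
  induction l generalizing b with
  | nil => simp
  | cons a l ih =>
    simp only [List.foldl_cons]
    obtain ⟨h1, h2, h3⟩ := ih (if decide (v a < b) && c a then v a else b)
    by_cases hva : v a < b <;> cases hc : c a <;>
      simp only [hva, hc, decide_true, decide_false, Bool.and_true, Bool.and_false,
        if_true] at h1 h2 h3 ⊢
    · refine ⟨h1, ?_, ?_⟩
      · rcases h2 with h | ⟨x, hx, hcx, hvx⟩
        · exact Or.inl h
        · exact Or.inr ⟨x, List.mem_cons_of_mem _ hx, hcx, hvx⟩
      · intro x hx hcx
        rcases List.mem_cons.1 hx with rfl | hx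
        · simp [hc] at hcx
        · exact h3 x hx hcx
    · refine ⟨le_of_lt (lt_of_le_of_lt h1 hva), ?_, ?_⟩
      · rcases h2 with h | ⟨x, hx, hcx, hvx⟩
        · exact Or.inr ⟨a, by simp, hc, h.symm⟩
        · exact Or.inr ⟨x, List.mem_cons_of_mem _ hx, hcx, hvx⟩
      · intro x hx hcx
        rcases List.mem_cons.1 hx with rfl | hx
        · exact h1
        · exact h3 x hx hcx
    · refine ⟨h1, ?_, ?_⟩
      · rcases h2 with h | ⟨x, hx, hcx, hvx⟩
        · exact Or.inl h
        · exact Or.inr ⟨x, List.mem_cons_of_mem _ hx, hcx, hvx⟩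
      · intro x hx hcx
        rcases List.mem_cons.1 hx with rfl | hx
        · simp [hc] at hcx
        · exact h3 x hx hcx
    · refine ⟨h1, ?_, ?_⟩
      · rcases h2 with h | ⟨x, hx, hcx, hvx⟩
        · exact Or.inl h
        · exact Or.inr ⟨x, List.mem_cons_of_mem _ hx, hcx, hvx⟩
      · intro x hx hcx
        rcases List.mem_cons.1 hx with rfl | hx
        · exact le_trans h1 (le_of_not_gt hva)
        · exact h3 x hx hcx

-- a priority p is hit by B's scan iff some table term of priority p occurs in vl
def pvHit (vl : List Char) (p : Nat) : Prop :=
  ∃ x ∈ pvPairs vl, x.2.1.isPrefixOf (vl.drop x.1) = true ∧ x.2.2 = p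

lemma pvTermPriority_ne_nil : ∀ tp ∈ pvTermPriority, tp.1 ≠ [] := by decide

lemma pvHit_iff (vl : List Char) (p : Nat) :
    pvHit vl p ↔ ∃ tp ∈ pvTermPriority, tp.2 = p ∧ PySem.Chars.isIn tp.1 vl = true := by
  unfold pvHit pvPairs
  constructor
  · rintro ⟨x, hx, hpre, hp⟩
    simp only [List.mem_flatMap, List.mem_range, List.mem_map] at hx
    obtain ⟨i, _, tp, htp, rfl⟩ := hx
    refine ⟨tp, htp, hp, ?_⟩
    exact (PySem.Chars.exists_prefix_drop_iff_isIn _ _).1 ⟨i, (List.isPrefixOf_iff_prefix).1 hpre⟩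
  · rintro ⟨tp, htp, hp, hin⟩
    obtain ⟨j, hj⟩ := (PySem.Chars.exists_prefix_drop_iff_isIn _ _).2 hin
    have hjlt : j < vl.length := by
      by_contra h
      have : vl.drop j = [] := List.drop_eq_nil_of_le (le_of_not_gt h)
      rw [this, List.prefix_nil] at hj
      exact pvTermPriority_ne_nil tp htp hj
    refine ⟨(j, tp), ?_, (List.isPrefixOf_iff_prefix).2 hj, hp⟩
    simp only [List.mem_flatMap, List.mem_range, List.mem_map]
    exact ⟨j, hjlt, tp, htp, rfl⟩

-- per-priority bridge to A's group tests (on the lowered code points)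
lemma pvHit0 (vl : List Char) : pvHit vl 0 ↔
    (["fintech", "payment", "banking", "insurance"].any (fun t => PySem.Chars.isIn t.toList vl)) = true := by
  rw [pvHit_iff]; simp [pvTermPriority]
lemma pvHit1 (vl : List Char) : pvHit vl 1 ↔
    (["health", "medical", "pharma", "bio"].any (fun t => PySem.Chars.isIn t.toList vl)) = true := by
  rw [pvHit_iff]; simp [pvTermPriority]
lemma pvHit2 (vl : List Char) : pvHit vl 2 ↔
    (["clean", "sustain", "environment", "green"].any (fun t => PySem.Chars.isIn t.toList vl)) = true := by
  rw [pvHit_iff]; simp [pvTermPriority]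
lemma pvHit3 (vl : List Char) : pvHit vl 3 ↔
    (["edu", "learn", "training"].any (fun t => PySem.Chars.isIn t.toList vl)) = true := by
  rw [pvHit_iff]; simp [pvTermPriority]
lemma pvHit4 (vl : List Char) : pvHit vl 4 ↔
    (["retail", "commerce", "consumer"].any (fun t => PySem.Chars.isIn t.toList vl)) = true := by
  rw [pvHit_iff]; simp [pvTermPriority]
lemma pvHit5 (vl : List Char) : pvHit vl 5 ↔
    (["enterprise", "b2b", "saas"].any (fun t => PySem.Chars.isIn t.toList vl)) = true := by
  rw [pvHit_iff]; simp [pvTermPriority]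

-- ===== VERDICT (by name: the statement is the Claim_ definition above) =====
theorem determine_industry_from_vertical_py_spec : Claim_equal_determine_industry_from_vertical_py := by
  intro vertical _
  unfold Spec_determine_industry_from_vertical_py
  dsimp only [determine_industry_from_vertical_py, determine_industry_from_vertical_py_alt]
  set vl := (PySem.Str.lower vertical).toList with hvl
  rw [show pvCategories.length = 6 from rfl, pvFlatten]
  obtain ⟨h1, h2, h3⟩ := pvFoldMin (fun x : Nat × (List Char × Nat) => x.2.2)
    (fun x : Nat × (List Char × Nat) => x.2.1.isPrefixOf (vl.drop x.1)) (pvPairs vl) 6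
  set r := (pvPairs vl).foldl
      (fun best x => if decide (x.2.2 < best) && x.2.1.isPrefixOf (vl.drop x.1) then x.2.2 else best) 6 with hr
  have hhit : ∀ p, pvHit vl p → r ≤ p := by
    rintro p ⟨x, hx, hc, hp⟩
    simpa [hp] using h3 x hx hc
  have hval : r = 6 ∨ pvHit vl r := by
    rcases h2 with h | ⟨x, hx, hc, hvx⟩
    · exact Or.inl h
    · exact Or.inr ⟨x, hx, hc, hvx⟩
  -- A's group tests in terms of Chars.isIn on vl
  simp only [PySem.Str.isIn_eq, ← hvl]
  cases hC0 : (["fintech", "payment", "banking", "insurance"].any (fun t => PySem.Chars.isIn t.toList vl)) with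
  | true =>
    have : r = 0 := Nat.le_zero.1 (hhit 0 ((pvHit0 vl).2 hC0))
    simp [hC0, this, pvCategories]
  | false =>
  cases hC1 : (["health", "medical", "pharma", "bio"].any (fun t => PySem.Chars.isIn t.toList vl)) with
  | true =>
    have hr1 : r ≤ 1 := hhit 1 ((pvHit1 vl).2 hC1)
    have : r = 1 := by
      rcases hval with h6 | hhitr
      · omega
      · interval_cases r
        · rw [pvHit0 vl] at hhitr; rw [hhitr] at hC0; cases hC0
        · rfl
    simp [hC0, hC1, this, pvCategories]
  | false =>
  cases hC2 : (["clean", "sustain", "environment", "green"].any (fun t => PySem.Chars.isIn t.toList vl)) with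
  | true =>
    have hr2 : r ≤ 2 := hhit 2 ((pvHit2 vl).2 hC2)
    have : r = 2 := by
      rcases hval with h6 | hhitr
      · omega
      · interval_cases r
        · rw [pvHit0 vl] at hhitr; rw [hhitr] at hC0; cases hC0
        · rw [pvHit1 vl] at hhitr; rw [hhitr] at hC1; cases hC1
        · rfl
    simp [hC0, hC1, hC2, this, pvCategories]
  | false =>
  cases hC3 : (["edu", "learn", "training"].any (fun t => PySem.Chars.isIn t.toList vl)) with
  | true =>
    have hr3 : r ≤ 3 := hhit 3 ((pvHit3 vl).2 hC3)
    have : r = 3 := by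
      rcases hval with h6 | hhitr
      · omega
      · interval_cases r
        · rw [pvHit0 vl] at hhitr; rw [hhitr] at hC0; cases hC0
        · rw [pvHit1 vl] at hhitr; rw [hhitr] at hC1; cases hC1
        · rw [pvHit2 vl] at hhitr; rw [hhitr] at hC2; cases hC2
        · rfl
    simp [hC0, hC1, hC2, hC3, this, pvCategories]
  | false =>
  cases hC4 : (["retail", "commerce", "consumer"].any (fun t => PySem.Chars.isIn t.toList vl)) with
  | true =>
    have hr4 : r ≤ 4 := hhit 4 ((pvHit4 vl).2 hC4)
    have : r = 4 := by
      rcases hval with h6 | hhitr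
      · omega
      · interval_cases r
        · rw [pvHit0 vl] at hhitr; rw [hhitr] at hC0; cases hC0
        · rw [pvHit1 vl] at hhitr; rw [hhitr] at hC1; cases hC1
        · rw [pvHit2 vl] at hhitr; rw [hhitr] at hC2; cases hC2
        · rw [pvHit3 vl] at hhitr; rw [hhitr] at hC3; cases hC3
        · rfl
    simp [hC0, hC1, hC2, hC3, hC4, this, pvCategories]
  | false =>
  cases hC5 : (["enterprise", "b2b", "saas"].any (fun t => PySem.Chars.isIn t.toList vl)) with
  | true =>
    have hr5 : r ≤ 5 := hhit 5 ((pvHit5 vl).2 hC5)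
    have : r = 5 := by
      rcases hval with h6 | hhitr
      · omega
      · interval_cases r
        · rw [pvHit0 vl] at hhitr; rw [hhitr] at hC0; cases hC0
        · rw [pvHit1 vl] at hhitr; rw [hhitr] at hC1; cases hC1
        · rw [pvHit2 vl] at hhitr; rw [hhitr] at hC2; cases hC2
        · rw [pvHit3 vl] at hhitr; rw [hhitr] at hC3; cases hC3
        · rw [pvHit4 vl] at hhitr; rw [hhitr] at hC4; cases hC4
        · rfl
    simp [hC0, hC1, hC2, hC3, hC4, hC5, this, pvCategories]
  | false =>
    have : r = 6 := by
      rcases hval with h6 | hhitr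
      · exact h6
      · exfalso
        interval_cases r
        · rw [pvHit0 vl] at hhitr; rw [hhitr] at hC0; cases hC0
        · rw [pvHit1 vl] at hhitr; rw [hhitr] at hC1; cases hC1
        · rw [pvHit2 vl] at hhitr; rw [hhitr] at hC2; cases hC2
        · rw [pvHit3 vl] at hhitr; rw [hhitr] at hC3; cases hC3
        · rw [pvHit4 vl] at hhitr; rw [hhitr] at hC4; cases hC4
        · rw [pvHit5 vl] at hhitr; rw [hhitr] at hC5; cases hC5
        · exact absurd ((pvHit_iff vl 6).1 hhitr) (by simp [pvTermPriority])
    simp [hC0, hC1, hC2, hC3, hC4, hC5, this]
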